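-- pv_equiv track=rewrite | github.com/maheshgm/ProgrammingGym | Codechef_Starters/BalancedReversals.py | solve
-- ===== SOURCE A (Python) =====
-- def solve(bin_s, len_s):
--     str_l = list(bin_s)
--     for i in range(len_s-1):
--         for j in range(len_s-i-1):
--             if str_l[j] > str_l[j+1]:
--                 str_l[j], str_l[j+1] = str_l[j+1], str_l[j]
--
--     result = "".join(str_l)
--     return result
-- ===== SOURCE B (Python) =====
-- def solve(bin_s, len_s):
--     # Sort the first len_s characters with the library sort; the tail is untouched.
--     k = max(len_s, 0)
--     return "".join(sorted(bin_s[:k])) + bin_s[k:]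
-- ===== Notes on version B (the rewrite author's own statement) =====
-- stated objective: faster
-- what changed: Replaces the handwritten O(n^2) index-swapping bubble sort with a single library sort of the first len_s characters, appending the untouched tail.
import Mathlib
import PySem

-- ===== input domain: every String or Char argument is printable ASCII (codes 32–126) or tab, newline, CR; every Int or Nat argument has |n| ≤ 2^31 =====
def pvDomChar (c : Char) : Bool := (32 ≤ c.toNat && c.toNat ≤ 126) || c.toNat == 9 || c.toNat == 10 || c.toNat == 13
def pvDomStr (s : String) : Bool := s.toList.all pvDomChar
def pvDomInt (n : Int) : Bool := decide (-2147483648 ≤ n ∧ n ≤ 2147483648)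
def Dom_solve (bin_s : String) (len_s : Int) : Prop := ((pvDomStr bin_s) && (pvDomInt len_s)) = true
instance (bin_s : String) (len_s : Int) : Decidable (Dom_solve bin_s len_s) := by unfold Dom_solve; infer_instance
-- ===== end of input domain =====

-- B replaces A's handwritten bubble sort by one library sort of the first len_s characters plus the untouched tail (measured faster; equality of RETURN values proved on Pre_).


-- ===== PORT A =====
-- one compare-and-swap step of the inner loop: 'if str_l[j] > str_l[j+1]: swap'
def swapStep (l : List Char) (j : Int) : List Char :=
  match PySem.List.pyGet? l j, PySem.List.pyGet? l (j + 1) with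
  | some a, some b => if a > b then (l.set j.toNat b).set (j + 1).toNat a else l
  | _, _ => l

def solve (bin_s : String) (len_s : Int) : String :=
  let str_l := bin_s.toList
  let str_l :=
    (PySem.List.pyRange 0 (len_s - 1) 1).foldl (fun l i =>
      (PySem.List.pyRange 0 (len_s - i - 1) 1).foldl swapStep l) str_l
  String.ofList str_l

-- ===== PORT B =====
def solve_alt (bin_s : String) (len_s : Int) : String :=
  let cs := bin_s.toList
  let k := max len_s 0
  String.ofList (PySem.List.sorted (PySem.List.slice cs none (some k)) (fun c => c) false
             ++ PySem.List.slice cs (some k) none)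

-- ===== PRECONDITION & SPEC =====
-- Pre_ excludes exactly the inputs on which A raises IndexError (len_s ≥ 2 and len_s > len(bin_s)).
def Pre_solve (bin_s : String) (len_s : Int) : Prop :=
  len_s ≤ (bin_s.toList.length : Int) ∨ len_s ≤ 1
instance (bin_s : String) (len_s : Int) : Decidable (Pre_solve bin_s len_s) := by
  unfold Pre_solve; infer_instance

def pvWitness_solve : String × Int := ("0101", 4)

def Spec_solve (bin_s : String) (len_s : Int) (out : String) : Prop := out = solve_alt bin_s len_s
instance (bin_s : String) (len_s : Int) (out : String) : Decidable (Spec_solve bin_s len_s out) := by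
  unfold Spec_solve; infer_instance

-- ===== CLAIM (what is proved, stated in full; the proofs are below) =====
def Claim_equal_solve : Prop := ∀ (bin_s : String) (len_s : Int),
  Dom_solve bin_s len_s → Pre_solve bin_s len_s → Spec_solve bin_s len_s (solve bin_s len_s)

-- ===== LEMMAS AND PROOFS =====

-- structural form of one inner bubble pass with m comparisons
def bpass : Nat → List Char → List Char
  | _, [] => []
  | _, [a] => [a]
  | 0, l => l
  | m + 1, a :: b :: t => if a > b then b :: bpass m (a :: t) else a :: bpass m (b :: t)

-- structural form of the whole bubble sort: passes with m, m-1, …, 1 comparisons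
def bub : Nat → List Char → List Char
  | 0, l => l
  | m + 1, l => bub m (bpass (m + 1) l)

theorem bpass_zero (l : List Char) : bpass 0 l = l := by
  cases l with
  | nil => rfl
  | cons a t => cases t <;> rfl

theorem bpass_nil (m : Nat) : bpass m [] = [] := by cases m <;> rfl

theorem bpass_single (m : Nat) (a : Char) : bpass m [a] = [a] := by cases m <;> rfl

theorem swapStep_nil (j : Int) : swapStep [] j = [] := by
  simp [swapStep, PySem.List.pyGet?]

theorem swapStep_shift (c : Char) (t : List Char) (k : Nat) :
    swapStep (c :: t) ((k : Int) + 1) = c :: swapStep t (k : Int) := by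
  have h1 : PySem.List.pyGet? (c :: t) ((k : Int) + 1) = PySem.List.pyGet? t (k : Int) :=
    PySem.List.pyGet?_cons_succ c t k
  have h2 : PySem.List.pyGet? (c :: t) ((k : Int) + 1 + 1) = PySem.List.pyGet? t ((k : Int) + 1) := by
    have := PySem.List.pyGet?_cons_succ c t (k + 1)
    simpa [Int.natCast_add] using this
  unfold swapStep
  rw [h1, h2]
  cases ha : PySem.List.pyGet? t (k : Int) with
  | none => cases hb : PySem.List.pyGet? t ((k : Int) + 1) <;> rfl
  | some a =>
    cases hb : PySem.List.pyGet? t ((k : Int) + 1) with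
    | none => rfl
    | some b =>
      have hk1 : ((k : Int) + 1).toNat = k + 1 := by omega
      have hk2 : ((k : Int) + 1 + 1).toNat = k + 2 := by omega
      have hk0 : ((k : Int)).toNat = k := by omega
      simp only [hk1, hk2, hk0]
      split <;> rfl

-- a fold of shifted swap steps leaves the head alone
theorem foldl_swapStep_shift (js : List Nat) (c : Char) (t : List Char) :
    js.foldl (fun (l : List Char) (k : Nat) => swapStep l ((k : Int) + 1)) (c :: t)
      = c :: js.foldl (fun (l : List Char) (k : Nat) => swapStep l (k : Int)) t := by
  induction js generalizing c t with
  | nil => rfl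
  | cons k ks ih => simp only [List.foldl_cons, swapStep_shift, ih]

-- the inner index loop is the structural pass
theorem inner_eq_bpass (m : Nat) (l : List Char) :
    (List.range m).foldl (fun (l : List Char) (k : Nat) => swapStep l (k : Int)) l = bpass m l := by
  induction m generalizing l with
  | zero => simp [bpass_zero]
  | succ m ih =>
    rw [List.range_succ_eq_map]
    simp only [List.foldl_cons, List.foldl_map, Nat.cast_zero]
    have hsh : ∀ l', (List.range m).foldl (fun (l : List Char) (k : Nat) => swapStep l ((k + 1 : Nat) : Int)) l'
        = (List.range m).foldl (fun (l : List Char) (k : Nat) => swapStep l ((k : Int) + 1)) l' := by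
      intro l'
      apply PySem.List.foldl_congr_mem
      intro acc x _
      norm_cast
    cases l with
    | nil =>
      rw [hsh, swapStep_nil]
      have hnil : ∀ js : List Nat, js.foldl (fun (l : List Char) (k : Nat) => swapStep l ((k : Int) + 1)) ([] : List Char) = [] := by
        intro js; induction js with
        | nil => rfl
        | cons k ks ih2 => simp [swapStep_nil, ih2]
      rw [hnil, bpass_nil]
    | cons a t =>
      cases t with
      | nil =>
        have hstep : swapStep [a] (0 : Int) = [a] := rfl
        rw [hsh, hstep, foldl_swapStep_shift, ih, bpass_nil, bpass_single]
      | cons b t =>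
        have hg1 : PySem.List.pyGet? (a :: b :: t) ((0 : Int) + 1) = some b := by
          simp
        have hstep : swapStep (a :: b :: t) (0 : Int)
            = if a > b then b :: a :: t else a :: b :: t := by
          unfold swapStep
          rw [PySem.List.pyGet?_zero_cons, hg1]
          show (if a > b then ((a :: b :: t).set (Int.toNat 0) b).set ((0 : Int) + 1).toNat a
                else a :: b :: t) = _
          split <;> rfl
        rw [hsh, hstep]
        by_cases hab : a > b
        · simp only [hab, if_pos]
          rw [foldl_swapStep_shift, ih]
          simp [bpass, hab]
        · simp only [hab, if_neg, not_false_iff]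
          rw [foldl_swapStep_shift, ih]
          simp [bpass, hab]

-- the port's inner pyRange fold, for a nonnegative bound
theorem pyfold_inner (M : Int) (l : List Char) :
    (PySem.List.pyRange 0 M 1).foldl swapStep l = bpass M.toNat l := by
  rw [PySem.List.pyRange_one]
  simp only [List.foldl_map, zero_add, sub_zero]
  exact inner_eq_bpass M.toNat l

theorem bpass_perm (m : Nat) (l : List Char) : (bpass m l).Perm l := by
  induction m generalizing l with
  | zero => rw [bpass_zero]
  | succ m ih =>
    cases l with
    | nil => simp [bpass]
    | cons a t =>
      cases t with
      | nil => simp [bpass]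
      | cons b t =>
        simp only [bpass]
        split
        · exact ((ih (a :: t)).cons b).trans (List.Perm.swap a b t)
        · exact (ih (b :: t)).cons a

theorem bpass_length (m : Nat) (l : List Char) : (bpass m l).length = l.length :=
  (bpass_perm m l).length_eq

theorem bpass_append (m : Nat) (l r : List Char) (h : m < l.length) :
    bpass m (l ++ r) = bpass m l ++ r := by
  induction m generalizing l with
  | zero => rw [bpass_zero, bpass_zero]
  | succ m ih =>
    match l, h with
    | a :: b :: t, h =>
      simp only [List.cons_append, bpass]
      have hlen : m < (List.length (a :: t)) := by simp only [List.length_cons] at h ⊢; omega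
      have hlen' : m < (List.length (b :: t)) := by simp only [List.length_cons] at h ⊢; omega
      split
      · rw [← List.cons_append, ih (a :: t) hlen]
        rfl
      · rw [← List.cons_append, ih (b :: t) hlen']
        rfl

-- the last element of a full pass bounds every input element
theorem bpass_last (m : Nat) (l : List Char) (h : l.length = m + 1) :
    ∃ l' x, bpass m l = l' ++ [x] ∧ ∀ y ∈ l, y ≤ x := by
  induction m generalizing l with
  | zero =>
    match l, h with
    | [a], _ => exact ⟨[], a, rfl, by simp⟩
  | succ m ih =>
    match l, h with
    | a :: b :: t, h =>
      have hlen : (a :: t).length = m + 1 := by simp at h ⊢; omega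
      have hlen' : (b :: t).length = m + 1 := by simp at h ⊢; omega
      simp only [bpass]
      by_cases hab : a > b
      · obtain ⟨l', x, hx, hall⟩ := ih (a :: t) hlen
        refine ⟨b :: l', x, by simp [hab, hx], ?_⟩
        intro y hy
        simp only [List.mem_cons] at hy
        rcases hy with rfl | rfl | hy
        · exact hall y (by simp)
        · exact le_of_lt (lt_of_lt_of_le hab (hall a (by simp)))
        · exact hall y (by simp [hy])
      · obtain ⟨l', x, hx, hall⟩ := ih (b :: t) hlen'
        refine ⟨a :: l', x, by simp [hab, hx], ?_⟩
        intro y hy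
        simp only [List.mem_cons] at hy
        rcases hy with rfl | rfl | hy
        · exact le_trans (not_lt.1 hab) (hall b (by simp))
        · exact hall y (by simp)
        · exact hall y (by simp [hy])

theorem bub_perm (n : Nat) (l : List Char) : (bub n l).Perm l := by
  induction n generalizing l with
  | zero => rfl
  | succ n ih => exact (ih (bpass (n + 1) l)).trans (bpass_perm (n + 1) l)

theorem bub_append (n : Nat) (l r : List Char) (h : n < l.length) :
    bub n (l ++ r) = bub n l ++ r := by
  induction n generalizing l with
  | zero => rfl
  | succ n ih =>
    simp only [bub]
    rw [bpass_append (n + 1) l r h]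
    have : n < (bpass (n + 1) l).length := by rw [bpass_length]; omega
    exact ih (bpass (n + 1) l) this

theorem bub_sorted (n : Nat) (l : List Char) (h : l.length = n + 1) :
    (bub n l).Pairwise (· ≤ ·) := by
  induction n generalizing l with
  | zero =>
    match l, h with
    | [a], _ => simp [bub]
  | succ n ih =>
    simp only [bub]
    obtain ⟨l', x, hx, hall⟩ := bpass_last (n + 1) l h
    have hlen : l'.length = n + 1 := by
      have := bpass_length (n + 1) l
      rw [hx] at this; simp at this; omega
    rw [hx, bub_append n l' [x] (by omega)]
    rw [List.pairwise_append]
    refine ⟨ih l' hlen, by simp, ?_⟩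
    intro y hy z hz
    have hz' : z = x := by simpa using hz
    subst hz'
    have h2 : y ∈ l' := (bub_perm n l').subset hy
    have h3 : y ∈ bpass (n + 1) l := by
      rw [hx]; exact List.mem_append_left _ h2
    exact hall y ((bpass_perm (n + 1) l).subset h3)

-- the outer loop in Nat form is bub
theorem outer_eq_bub (n : Nat) (l : List Char) :
    (List.range n).foldl (fun l i => bpass (n - i) l) l = bub n l := by
  induction n generalizing l with
  | zero => rfl
  | succ n ih =>
    rw [List.range_succ_eq_map]
    simp only [List.foldl_cons, List.foldl_map, Nat.sub_zero]
    have : ∀ l', (List.range n).foldl (fun l k => bpass (n + 1 - (k + 1)) l) l'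
        = (List.range n).foldl (fun l k => bpass (n - k) l) l' := by
      intro l'
      apply PySem.List.foldl_congr_mem
      intro acc x _
      congr 1
      omega
    rw [this, ih]
    rfl

-- sorted prefix + untouched tail for trivial prefix lengths 0 and 1
theorem sorted_small (cs : List Char) (j : Nat) (hj : j ≤ 1) :
    PySem.List.sorted (List.take j cs) (fun c => c) false ++ List.drop j cs = cs := by
  interval_cases j
  · simp [PySem.List.sorted]
  · cases cs with
    | nil => simp [PySem.List.sorted]
    | cons c t =>
      have hone : PySem.List.sorted [c] (fun c => c) false = [c] := rfl
      simp [hone]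

-- main case: the double fold bubble-sorts the first K characters
theorem outer_fold_eq (K : Nat) (cs : List Char) :
    (List.range (K - 1)).foldl (fun (l : List Char) (k : Nat) =>
        (PySem.List.pyRange 0 ((K : Int) - (k : Int) - 1) 1).foldl swapStep l) cs
      = bub (K - 1) cs := by
  refine Eq.trans ?_ (outer_eq_bub (K - 1) cs)
  apply PySem.List.foldl_congr_mem
  intro acc k hk
  have hk' : k < K - 1 := List.mem_range.1 hk
  rw [pyfold_inner]
  congr 1
  omega

-- main case: the double fold bubble-sorts the first K characters
theorem main_eq (cs : List Char) (K : Nat) (h2 : 2 ≤ K) (hK : K ≤ cs.length) :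
    (PySem.List.pyRange 0 ((K : Int) - 1) 1).foldl (fun l i =>
        (PySem.List.pyRange 0 ((K : Int) - i - 1) 1).foldl swapStep l) cs
      = PySem.List.sorted (List.take K cs) (fun c => c) false ++ List.drop K cs := by
  rw [PySem.List.pyRange_one, List.foldl_map]
  simp only [sub_zero, zero_add]
  have hto : ((K : Int) - 1).toNat = K - 1 := by omega
  rw [hto, outer_fold_eq K cs]
  have hlt : (List.take K cs).length = K := by simp [hK]
  have hbub : bub (K - 1) cs = bub (K - 1) (List.take K cs) ++ List.drop K cs := by
    conv_lhs => rw [← List.take_append_drop K cs]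
    exact bub_append (K - 1) _ _ (by omega)
  rw [hbub]
  congr 1
  have hperm := bub_perm (K - 1) (List.take K cs)
  have hpw := bub_sorted (K - 1) (List.take K cs) (by omega)
  exact (PySem.List.sorted_id_eq_of_perm_of_pairwise _ _ hperm hpw).symm

-- ===== VERDICT (by name: the statement is the Claim_ definition above) =====
theorem solve_spec : Claim_equal_solve := by
  intro bin_s len_s _ hpre
  unfold Spec_solve
  simp only [solve, solve_alt]
  set cs := bin_s.toList with hcs
  by_cases h1 : len_s ≤ 1
  · -- the loops do nothing; the sorted prefix has at most one character
    have houter : PySem.List.pyRange 0 (len_s - 1) 1 = [] :=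
      PySem.List.pyRange_one_eq_nil (by omega)
    rw [houter]
    simp only [List.foldl_nil]
    have hk : max len_s 0 = ((max len_s 0).toNat : Int) := by omega
    have hj : (max len_s 0).toNat ≤ 1 := by omega
    rw [hk, PySem.List.slice_to_natCast, PySem.List.slice_from_natCast]
    rw [sorted_small cs _ hj]
  · -- 2 ≤ len_s ≤ len(cs)
    have hlen : len_s ≤ (cs.length : Int) := by
      rcases hpre with h | h
      · exact h
      · omega
    set K := len_s.toNat with hKdef
    have hKc : (K : Int) = len_s := by omega
    have h2 : 2 ≤ K := by omega
    have hK : K ≤ cs.length := by omega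
    have hmax : max len_s 0 = (K : Int) := by omega
    rw [hmax, PySem.List.slice_to_natCast, PySem.List.slice_from_natCast, ← hKc]
    rw [main_eq cs K h2 hK]
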